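-- pv_equiv track=rewrite | github.com/alessandrofd/leetcode-python | 403-frog-jump.py | canCross_bfs
-- ===== SOURCE A (Python) =====
-- from typing import List
--
-- def canCross_bfs(stones: List[int]) -> bool:
--     """
--     BFS
--     """
--     n = len(stones)
--     if stones[1] != 1:
--         return False
--     if n == 2:
--         return True
--
--     stones_set = set(stones)
--     visited = set()
--
--     stack = [(1, 1)]
--     while stack:
--         stone, jump = stack.pop()
--         for next_jump in range(max(1, jump - 1), jump + 2):
--             next_stone = stone + next_jump
--
--             if next_stone in stones_set and (next_stone, next_jump) not in visited:
--                 if next_stone == stones[-1]: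
--                     return True
--
--                 stack.append((next_stone, next_jump))
--
--             visited.add((next_stone, next_jump))
--
--     return False
-- ===== SOURCE B (Python) =====
-- from typing import List
--
-- def canCross_bfs(stones: List[int]) -> bool:
--     """
--     Forward DP over stone values in sorted order: arrived[v] collects the jump
--     sizes with which the frog can land on value v; all jumps are positive, so
--     increasing-value order processes every predecessor first.
--     """
--     if stones[1] != 1:
--         return False
--     if len(stones) == 2:
--         return True
--
--     target = stones[-1]
--     arrived = {s: [] for s in stones}
--     for v in sorted(arrived):
--         jumps = arrived[v] + ([1] if v == 1 else [])
--         for j in jumps: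
--             for nj in (j - 1, j, j + 1):
--                 if nj >= 1 and v + nj in arrived:
--                     lst = arrived[v + nj]
--                     if nj not in lst:
--                         lst.append(nj)
--     return bool(arrived[target])
-- ===== Notes on version B (the rewrite author's own statement) =====
-- stated objective: alternative
-- what changed: A's stack-based depth-first search over (stone, jump) states with a visited set is replaced by a forward dynamic programme: a dict maps each stone value to the list of jump sizes that can land there, filled in one pass over the stone values in sorted order (all jumps are positive, so every predecessor is processed first), and the answer is whether the last stone's list is nonempty.
-- outside the precondition, e.g. on canCross_bfs([1]): A raises IndexError, B raises IndexError
import Mathlib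
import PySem

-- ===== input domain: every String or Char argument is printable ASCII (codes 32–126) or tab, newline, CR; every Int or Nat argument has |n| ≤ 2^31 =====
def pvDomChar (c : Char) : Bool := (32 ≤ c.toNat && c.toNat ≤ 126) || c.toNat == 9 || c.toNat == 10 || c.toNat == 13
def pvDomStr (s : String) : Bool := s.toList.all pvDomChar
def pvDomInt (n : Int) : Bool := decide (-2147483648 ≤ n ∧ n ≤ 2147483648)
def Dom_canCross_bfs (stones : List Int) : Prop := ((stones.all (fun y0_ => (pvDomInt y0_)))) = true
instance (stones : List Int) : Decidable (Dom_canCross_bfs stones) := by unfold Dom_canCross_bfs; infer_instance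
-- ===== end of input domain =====

-- B replaces A's stack-plus-visited depth-first search by a forward dynamic programme over the
-- stone values in sorted order (all jumps are positive, so every predecessor is processed first);
-- same return value, different algorithm (objective: alternative).

-- ===== PORT A =====
-- the inner 'for next_jump in range(max(1, jump-1), jump+2)' loop; 'none' = 'return True'
def canCrossForA (stonesSet : PySem.Set Int) (last stone : Int) :
    List Int → List (Int × Int) → PySem.Set (Int × Int) →
      Option (List (Int × Int) × PySem.Set (Int × Int))
  | [], stack, visited => some (stack, visited)
  | nextJump :: rest, stack, visited =>
      let nextStone := stone + nextJump
      if nextStone ∈ stonesSet ∧ (nextStone, nextJump) ∉ visited then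
        if nextStone = last then none
        else canCrossForA stonesSet last stone rest ((nextStone, nextJump) :: stack)
              (PySem.Set.add visited (nextStone, nextJump))
      else canCrossForA stonesSet last stone rest stack (PySem.Set.add visited (nextStone, nextJump))

-- the 'while stack' loop; fuel only makes the recursion total (proved sufficient below),
-- head of the list = top of the Python stack (stack.pop() pops from the end)
def canCrossLoopA (stonesSet : PySem.Set Int) (last : Int) :
    Nat → List (Int × Int) → PySem.Set (Int × Int) → Bool
  | 0, _, _ => false
  | _ + 1, [], _ => false
  | fuel + 1, (stone, jump) :: stack, visited =>
      match canCrossForA stonesSet last stone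
          (PySem.List.pyRange (max 1 (jump - 1)) (jump + 2) 1) stack visited with
      | none => true
      | some (stack', visited') => canCrossLoopA stonesSet last fuel stack' visited'

def canCrossFuel (stones : List Int) : Nat := 2 + 2 * (stones.map Int.toNat).sum

def canCross_bfs (stones : List Int) : Bool :=
  match PySem.List.pyGet? stones 1 with
  | none => false        -- Python raises IndexError here (len(stones) < 2); excluded by Pre_
  | some s1 =>
      if s1 ≠ 1 then false
      else if stones.length = 2 then true
      else
        canCrossLoopA (PySem.Set.ofList stones) (PySem.List.pyGetD stones (-1) 0)
          (canCrossFuel stones) [(1, 1)] PySem.Set.empty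

-- ===== PORT B =====
-- 'if nj >= 1 and v + nj in arrived: … if nj not in lst: lst.append(nj)' for one candidate jump
def canCrossStepB (v : Int) (d : PySem.Dict Int (List Int)) (nj : Int) :
    PySem.Dict Int (List Int) :=
  if 1 ≤ nj ∧ d.contains (v + nj) = true then
    d.modify (v + nj) [] (fun l => if nj ∈ l then l else l ++ [nj])
  else d

-- 'for nj in (j - 1, j, j + 1): …'
def canCrossAddB (v : Int) (d : PySem.Dict Int (List Int)) (j : Int) :
    PySem.Dict Int (List Int) :=
  [j - 1, j, j + 1].foldl (canCrossStepB v) d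

-- one iteration of 'for v in sorted(arrived): …'
def canCrossProcB (d : PySem.Dict Int (List Int)) (v : Int) : PySem.Dict Int (List Int) :=
  let jumps := d.getD v [] ++ (if v = 1 then [1] else [])
  jumps.foldl (canCrossAddB v) d

def canCross_bfs_alt (stones : List Int) : Bool :=
  match PySem.List.pyGet? stones 1 with
  | none => false        -- Python raises IndexError here (len(stones) < 2); excluded by Pre_
  | some s1 =>
      if s1 ≠ 1 then false
      else if stones.length = 2 then true
      else
        let target := PySem.List.pyGetD stones (-1) 0
        let arrived := stones.foldl (fun d s => d.insert s ([] : List Int)) PySem.Dict.empty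
        let final := (PySem.List.sorted arrived.keys (fun x => x) false).foldl canCrossProcB arrived
        !(final.getD target []).isEmpty

-- ===== PRECONDITION & SPEC =====
-- Pre_ excludes exactly the inputs with fewer than two stones, on which the access stones[1]
-- makes both A and B raise IndexError.
def Pre_canCross_bfs (stones : List Int) : Prop := 2 ≤ stones.length
instance (stones : List Int) : Decidable (Pre_canCross_bfs stones) := by
  unfold Pre_canCross_bfs; infer_instance

def pvWitness_canCross_bfs : List Int := [0, 1, 3, 5, 6, 8, 12, 17]

def Spec_canCross_bfs (stones : List Int) (out : Bool) : Prop := out = canCross_bfs_alt stones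
instance (stones : List Int) (out : Bool) : Decidable (Spec_canCross_bfs stones out) := by
  unfold Spec_canCross_bfs; infer_instance

-- ===== CLAIM (what is proved, stated in full; the proofs are below) =====
def Claim_equal_canCross_bfs : Prop :=
  ∀ (stones : List Int), Dom_canCross_bfs stones → Pre_canCross_bfs stones →
    Spec_canCross_bfs stones (canCross_bfs stones)

-- ===== LEMMAS AND PROOFS =====

-- the common characterisation: Arr stones s j ⟺ the frog can land on stone value s with a
-- jump of size j (starting on value 1 with an available jump of size 1, at least one hop taken)
inductive Arr (stones : List Int) : Int → Int → Prop
  | first (nj : Int) : 1 ≤ nj → nj ≤ 2 → (1 + nj) ∈ stones → Arr stones (1 + nj) nj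
  | step (s j nj : Int) : Arr stones s j → max 1 (j - 1) ≤ nj → nj ≤ j + 1 →
      (s + nj) ∈ stones → Arr stones (s + nj) nj

def ReachP (stones : List Int) (s j : Int) : Prop := (s = 1 ∧ j = 1) ∨ Arr stones s j

lemma Arr_mem {stones : List Int} {s j : Int} (h : Arr stones s j) : s ∈ stones := by
  cases h <;> assumption

lemma ReachP_succ {stones : List Int} {s j nj : Int} (h : ReachP stones s j)
    (h1 : max 1 (j - 1) ≤ nj) (h2 : nj ≤ j + 1) (hm : (s + nj) ∈ stones) :
    Arr stones (s + nj) nj := by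
  rcases h with ⟨rfl, rfl⟩ | h
  · exact Arr.first nj (by omega) (by omega) hm
  · exact Arr.step s j nj h h1 h2 hm

lemma Arr_inv {stones : List Int} {w x : Int} (h : Arr stones w x) :
    ∃ s j, ReachP stones s j ∧ max 1 (j - 1) ≤ x ∧ x ≤ j + 1 ∧ w = s + x ∧ w ∈ stones ∧
      s < w ∧ (s = 1 ∨ s ∈ stones) := by
  cases h with
  | first nj h1 h2 hm =>
      exact ⟨1, 1, Or.inl ⟨rfl, rfl⟩, by omega, by omega, rfl, hm, by omega, Or.inl rfl⟩
  | step s j nj ha h1 h2 hm =>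
      exact ⟨s, j, Or.inr ha, h1, h2, rfl, hm, by omega, Or.inr (Arr_mem ha)⟩

-- ---------- A-side: worklist invariant ----------

def SeenP (V : PySem.Set (Int × Int)) (s j : Int) : Prop := (s = 1 ∧ j = 1) ∨ (s, j) ∈ V

def DoneP (V : PySem.Set (Int × Int)) (s j : Int) : Prop :=
  ∀ nj : Int, max 1 (j - 1) ≤ nj → nj ≤ j + 1 → (s + nj, nj) ∈ V

structure InvA (stones : List Int) (last : Int) (K : List (Int × Int))
    (V : PySem.Set (Int × Int)) : Prop where
  reach : ∀ p ∈ K, ReachP stones p.1 p.2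
  bnd : ∀ p ∈ K, 1 ≤ p.2 ∧ p.2 ≤ p.1
  seen : ∀ p ∈ K, SeenP V p.1 p.2
  nolast : ∀ j : Int, (last, j) ∉ V
  done : ∀ s j : Int, SeenP V s j → s ∈ stones → (s, j) ∈ K ∨ DoneP V s j

def Pfin (stones : List Int) : Finset (Int × Int) :=
  stones.toFinset.biUnion (fun s => (Finset.range s.toNat).image (fun k : Nat => (s, (k : Int) + 1)))

def measA (stones : List Int) (K : List (Int × Int)) (V : PySem.Set (Int × Int)) : Nat :=
  K.length + 2 * ((Pfin stones) \ V.toFinset).card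

lemma mem_Pfin {stones : List Int} {s j : Int} :
    (s, j) ∈ Pfin stones ↔ s ∈ stones ∧ 1 ≤ j ∧ j ≤ s := by
  simp only [Pfin, Finset.mem_biUnion, Finset.mem_image, Finset.mem_range, List.mem_toFinset]
  constructor
  · rintro ⟨a, ha, k, hk, h⟩
    rw [Prod.mk.injEq] at h
    obtain ⟨rfl, rfl⟩ := h
    refine ⟨ha, by omega, by omega⟩
  · rintro ⟨h1, h2, h3⟩
    refine ⟨s, h1, (j - 1).toNat, by omega, ?_⟩
    rw [Prod.mk.injEq]
    exact ⟨rfl, by omega⟩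

lemma toFinset_add_not_mem {V : PySem.Set (Int × Int)} {p : Int × Int} (h : p ∉ V) :
    (PySem.Set.add V p).toFinset = insert p V.toFinset := by
  rw [PySem.Set.add_of_not_mem h]
  simp [List.toFinset_append]

lemma card_diff_add_mem {P : Finset (Int × Int)} {V : PySem.Set (Int × Int)} {p : Int × Int}
    (hp : p ∈ P) (hnp : p ∉ V) :
    (P \ (PySem.Set.add V p).toFinset).card + 1 = (P \ V.toFinset).card := by
  rw [toFinset_add_not_mem hnp, Finset.sdiff_insert]
  rw [Finset.card_erase_of_mem (by simp [Finset.mem_sdiff, hp, List.mem_toFinset, hnp])]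
  have hpos : 0 < (P \ V.toFinset).card :=
    Finset.card_pos.mpr ⟨p, by simp [Finset.mem_sdiff, hp, List.mem_toFinset, hnp]⟩
  omega

lemma card_diff_add_le (P : Finset (Int × Int)) (V : PySem.Set (Int × Int)) (p : Int × Int) :
    (P \ (PySem.Set.add V p).toFinset).card ≤ (P \ V.toFinset).card := by
  apply Finset.card_le_card
  apply Finset.sdiff_subset_sdiff (Finset.Subset.refl _)
  intro x hx
  simp only [List.mem_toFinset] at hx ⊢
  exact (PySem.Set.mem_add _ _ _).mpr (Or.inl hx)

lemma forA_spec (stones : List Int) (last stone jump : Int)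
    (hlast : last ∈ stones)
    (hre : ReachP stones stone jump) (hj1 : 1 ≤ jump) (hjs : jump ≤ stone) :
    ∀ (njs : List Int) (K : List (Int × Int)) (V : PySem.Set (Int × Int)),
    (∀ nj ∈ njs, max 1 (jump - 1) ≤ nj ∧ nj ≤ jump + 1) →
    (∀ p ∈ K, ReachP stones p.1 p.2) →
    (∀ p ∈ K, 1 ≤ p.2 ∧ p.2 ≤ p.1) →
    (∀ p ∈ K, SeenP V p.1 p.2) →
    (∀ j : Int, (last, j) ∉ V) →
    (∀ s j : Int, SeenP V s j → s ∈ stones → (s, j) ∈ K ∨ DoneP V s j ∨ (s = stone ∧ j = jump)) →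
    (∀ nj : Int, max 1 (jump - 1) ≤ nj → nj ≤ jump + 1 → nj ∉ njs → (stone + nj, nj) ∈ V) →
    (canCrossForA (PySem.Set.ofList stones) last stone njs K V = none →
        ∃ j, Arr stones last j) ∧
    (∀ K' V', canCrossForA (PySem.Set.ofList stones) last stone njs K V = some (K', V') →
        InvA stones last K' V' ∧ measA stones K' V' ≤ measA stones K V) := by
  intro njs
  induction njs with
  | nil =>
      intro K V _ hK1 hK2 hK3 hV4 h5 hacc
      constructor
      · intro h; simp [canCrossForA] at h
      · intro K' V' h
        simp only [canCrossForA, Option.some.injEq, Prod.mk.injEq] at h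
        obtain ⟨rfl, rfl⟩ := h
        refine ⟨⟨hK1, hK2, hK3, hV4, ?_⟩, le_refl _⟩
        intro s j hseen hmem
        rcases h5 s j hseen hmem with h | h | ⟨rfl, rfl⟩
        · exact Or.inl h
        · exact Or.inr h
        · exact Or.inr (fun nj hb1 hb2 => hacc nj hb1 hb2 (List.not_mem_nil))
  | cons nj rest ih =>
      intro K V hnjs hK1 hK2 hK3 hV4 h5 hacc
      obtain ⟨hb1, hb2⟩ := hnjs nj List.mem_cons_self
      have hrest : ∀ nj' ∈ rest, max 1 (jump - 1) ≤ nj' ∧ nj' ≤ jump + 1 :=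
        fun nj' h => hnjs nj' (List.mem_cons_of_mem _ h)
      simp only [canCrossForA]
      by_cases hc : stone + nj ∈ PySem.Set.ofList stones ∧ (stone + nj, nj) ∉ V
      · rw [if_pos hc]
        have hmemst : stone + nj ∈ stones := (PySem.Set.mem_ofList _ _).mp hc.1
        by_cases hl : stone + nj = last
        · rw [if_pos hl]
          constructor
          · intro _
            exact ⟨nj, hl ▸ ReachP_succ hre hb1 hb2 hmemst⟩
          · intro K' V' h; simp at h
        · rw [if_neg hl]
          have hArr : Arr stones (stone + nj) nj := ReachP_succ hre hb1 hb2 hmemst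
          have hPm : (stone + nj, nj) ∈ Pfin stones :=
            mem_Pfin.mpr ⟨hmemst, by omega, by omega⟩
          have H := ih ((stone + nj, nj) :: K) (PySem.Set.add V (stone + nj, nj)) hrest
            (by
              intro q hq
              rcases List.mem_cons.mp hq with rfl | hq
              · exact Or.inr hArr
              · exact hK1 q hq)
            (by
              intro q hq
              rcases List.mem_cons.mp hq with rfl | hq
              · exact ⟨by omega, by omega⟩
              · exact hK2 q hq)
            (by
              intro q hq
              rcases List.mem_cons.mp hq with rfl | hq
              · exact Or.inr ((PySem.Set.mem_add _ _ _).mpr (Or.inr rfl))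
              · rcases hK3 q hq with h | h
                · exact Or.inl h
                · exact Or.inr ((PySem.Set.mem_add _ _ _).mpr (Or.inl h)))
            (by
              intro j hj
              rcases (PySem.Set.mem_add _ _ _).mp hj with h | h
              · exact hV4 j h
              · rw [Prod.mk.injEq] at h
                exact hl h.1.symm)
            (by
              intro s j hseen hmem
              have hmono : DoneP V s j → DoneP (PySem.Set.add V (stone + nj, nj)) s j :=
                fun hd nj' hb1' hb2' =>
                  (PySem.Set.mem_add _ _ _).mpr (Or.inl (hd nj' hb1' hb2'))
              rcases hseen with hs | hs
              · rcases h5 s j (Or.inl hs) hmem with h | h | h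
                · exact Or.inl (List.mem_cons_of_mem _ h)
                · exact Or.inr (Or.inl (hmono h))
                · exact Or.inr (Or.inr h)
              · rcases (PySem.Set.mem_add _ _ _).mp hs with h | h
                · rcases h5 s j (Or.inr h) hmem with h' | h' | h'
                  · exact Or.inl (List.mem_cons_of_mem _ h')
                  · exact Or.inr (Or.inl (hmono h'))
                  · exact Or.inr (Or.inr h')
                · exact Or.inl (by rw [h]; exact List.mem_cons_self))
            (by
              intro nj' hb1' hb2' hnr
              by_cases he : nj' = nj
              · subst he
                exact (PySem.Set.mem_add _ _ _).mpr (Or.inr rfl)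
              · refine (PySem.Set.mem_add _ _ _).mpr (Or.inl ?_)
                exact hacc nj' hb1' hb2'
                  (fun hmem' => hnr ((List.mem_cons.mp hmem').resolve_left he)))
          refine ⟨H.1, ?_⟩
          intro K' V' h
          obtain ⟨hi, hm⟩ := H.2 K' V' h
          refine ⟨hi, le_trans hm ?_⟩
          unfold measA
          have := card_diff_add_mem hPm hc.2
          simp only [List.length_cons]
          omega
      · rw [if_neg hc]
        have H := ih K (PySem.Set.add V (stone + nj, nj)) hrest hK1 hK2
          (by
            intro q hq
            rcases hK3 q hq with h | h
            · exact Or.inl h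
            · exact Or.inr ((PySem.Set.mem_add _ _ _).mpr (Or.inl h)))
          (by
            intro j hj
            rcases (PySem.Set.mem_add _ _ _).mp hj with h | h
            · exact hV4 j h
            · have hfst : last = stone + nj := congrArg Prod.fst h
              have hv : (stone + nj, nj) ∈ V := by
                by_contra hnv
                exact hc ⟨by rw [PySem.Set.mem_ofList, ← hfst]; exact hlast, hnv⟩
              exact hV4 j (by rw [h]; exact hv))
          (by
            intro s j hseen hmem
            have hmono : DoneP V s j → DoneP (PySem.Set.add V (stone + nj, nj)) s j :=
              fun hd nj' hb1' hb2' =>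
                (PySem.Set.mem_add _ _ _).mpr (Or.inl (hd nj' hb1' hb2'))
            have hred : SeenP V s j → _ := fun hs' => h5 s j hs' hmem
            rcases hseen with hs | hs
            · rcases hred (Or.inl hs) with h | h | h
              · exact Or.inl h
              · exact Or.inr (Or.inl (hmono h))
              · exact Or.inr (Or.inr h)
            · rcases (PySem.Set.mem_add _ _ _).mp hs with h | h
              · rcases hred (Or.inr h) with h' | h' | h'
                · exact Or.inl h'
                · exact Or.inr (Or.inl (hmono h'))
                · exact Or.inr (Or.inr h')
              · have hfst : s = stone + nj := congrArg Prod.fst h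
                have hv : (s, j) ∈ V := by
                  by_contra hnv
                  rw [h] at hnv
                  exact hc ⟨by rw [PySem.Set.mem_ofList, ← hfst]; exact hmem, hnv⟩
                rcases hred (Or.inr hv) with h' | h' | h'
                · exact Or.inl h'
                · exact Or.inr (Or.inl (hmono h'))
                · exact Or.inr (Or.inr h'))
          (by
            intro nj' hb1' hb2' hnr
            by_cases he : nj' = nj
            · subst he
              exact (PySem.Set.mem_add _ _ _).mpr (Or.inr rfl)
            · refine (PySem.Set.mem_add _ _ _).mpr (Or.inl ?_)
              exact hacc nj' hb1' hb2'
                (fun hmem' => hnr ((List.mem_cons.mp hmem').resolve_left he)))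
        refine ⟨H.1, ?_⟩
        intro K' V' h
        obtain ⟨hi, hm⟩ := H.2 K' V' h
        refine ⟨hi, le_trans hm ?_⟩
        unfold measA
        have := card_diff_add_le (Pfin stones) V (stone + nj, nj)
        omega

lemma no_arr_of_done {stones : List Int} {last : Int} {V : PySem.Set (Int × Int)}
    (hone : (1 : Int) ∈ stones) (inv : InvA stones last [] V) :
    ¬ ∃ j, Arr stones last j := by
  rintro ⟨j, hj⟩
  have hall : ∀ s j' : Int, Arr stones s j' → (s, j') ∈ V := by
    intro s j' h
    induction h with
    | first nj hb1 hb2 hm =>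
        rcases inv.done 1 1 (Or.inl ⟨rfl, rfl⟩) hone with h | h
        · simp at h
        · exact h nj (by omega) (by omega)
    | step s0 j0 nj ha hb1 hb2 hm ih =>
        rcases inv.done s0 j0 (Or.inr ih) (Arr_mem ha) with h | h
        · simp at h
        · exact h nj hb1 hb2
  exact inv.nolast j (hall last j hj)

lemma loopA_spec (stones : List Int) (last : Int) (hone : (1 : Int) ∈ stones)
    (hlast : last ∈ stones) :
    ∀ (fuel : Nat) (K : List (Int × Int)) (V : PySem.Set (Int × Int)),
    InvA stones last K V → measA stones K V < fuel →
    (canCrossLoopA (PySem.Set.ofList stones) last fuel K V = true ↔ ∃ j, Arr stones last j) := by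
  intro fuel
  induction fuel with
  | zero =>
      intro K V _ hm
      exact absurd hm (by omega)
  | succ fuel ih =>
      intro K V inv hm
      match K with
      | [] =>
          constructor
          · intro h; cases h
          · intro hex; exact absurd hex (no_arr_of_done hone inv)
      | (stone, jump) :: K =>
          have hmemK : (stone, jump) ∈ (stone, jump) :: K := List.mem_cons_self
          have hF := forA_spec stones last stone jump hlast
            (inv.reach _ hmemK) ((inv.bnd _ hmemK).1) ((inv.bnd _ hmemK).2)
            (PySem.List.pyRange (max 1 (jump - 1)) (jump + 2) 1) K V
            (by
              intro nj hmemr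
              rw [PySem.List.mem_pyRange_one] at hmemr
              omega)
            (fun p hp => inv.reach p (List.mem_cons_of_mem _ hp))
            (fun p hp => inv.bnd p (List.mem_cons_of_mem _ hp))
            (fun p hp => inv.seen p (List.mem_cons_of_mem _ hp))
            inv.nolast
            (by
              intro s j hseen hmem
              rcases inv.done s j hseen hmem with h | h
              · rcases List.mem_cons.mp h with h | h
                · exact Or.inr (Or.inr
                    ⟨congrArg Prod.fst h, congrArg Prod.snd h⟩)
                · exact Or.inl h
              · exact Or.inr (Or.inl h))
            (by
              intro nj hb1 hb2 hnr
              exfalso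
              exact hnr (by rw [PySem.List.mem_pyRange_one]; omega))
          simp only [canCrossLoopA]
          cases hFA : canCrossForA (PySem.Set.ofList stones) last stone
              (PySem.List.pyRange (max 1 (jump - 1)) (jump + 2) 1) K V with
          | none =>
              exact ⟨fun _ => hF.1 hFA, fun _ => rfl⟩
          | some pr =>
              obtain ⟨K', V'⟩ := pr
              obtain ⟨inv', hm'⟩ := hF.2 K' V' hFA
              apply ih K' V' inv'
              have hK : measA stones ((stone, jump) :: K) V = measA stones K V + 1 := by
                unfold measA
                simp [List.length_cons]
                omega
              omega

lemma sum_toFinset_le (l : List Int) :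
    (∑ s ∈ l.toFinset, s.toNat) ≤ (l.map Int.toNat).sum := by
  induction l with
  | nil => simp
  | cons a l ih =>
      rw [List.toFinset_cons, List.map_cons, List.sum_cons]
      by_cases h : a ∈ l.toFinset
      · rw [Finset.insert_eq_self.mpr h]
        omega
      · rw [Finset.sum_insert h]
        omega

lemma card_Pfin_le (stones : List Int) :
    (Pfin stones).card ≤ (stones.map Int.toNat).sum := by
  refine le_trans Finset.card_biUnion_le (le_trans ?_ (sum_toFinset_le stones))
  refine Finset.sum_le_sum ?_
  intro s _
  exact le_trans Finset.card_image_le (Finset.card_range s.toNat).le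

lemma A_main (stones : List Int) (hone : (1 : Int) ∈ stones)
    (hlast : PySem.List.pyGetD stones (-1) 0 ∈ stones) :
    (canCrossLoopA (PySem.Set.ofList stones) (PySem.List.pyGetD stones (-1) 0)
        (canCrossFuel stones) [(1, 1)] PySem.Set.empty = true) ↔
      ∃ j, Arr stones (PySem.List.pyGetD stones (-1) 0) j := by
  apply loopA_spec stones _ hone hlast
  · constructor
    · intro p hp
      rcases List.mem_cons.mp hp with rfl | hp
      · exact Or.inl ⟨rfl, rfl⟩
      · simp at hp
    · intro p hp
      rcases List.mem_cons.mp hp with rfl | hp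
      · exact ⟨le_refl _, le_refl _⟩
      · simp at hp
    · intro p hp
      rcases List.mem_cons.mp hp with rfl | hp
      · exact Or.inl ⟨rfl, rfl⟩
      · simp at hp
    · intro j hj
      simp [PySem.Set.empty] at hj
    · intro s j hseen hmem
      rcases hseen with ⟨rfl, rfl⟩ | h
      · exact Or.inl List.mem_cons_self
      · simp [PySem.Set.empty] at h
  · have hcard := card_Pfin_le stones
    unfold measA canCrossFuel
    simp [PySem.Set.empty]
    omega

-- ---------- B-side: sorted forward DP invariant ----------

structure InvB (stones : List Int) (suf : List Int) (d : PySem.Dict Int (List Int)) : Prop where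
  keys : ∀ k : Int, d.contains k = true ↔ k ∈ stones
  sound : ∀ v j : Int, j ∈ d.getD v [] → Arr stones v j
  complete : ∀ s j nj : Int, ReachP stones s j → max 1 (j - 1) ≤ nj → nj ≤ j + 1 →
      (s + nj) ∈ stones → s ∉ suf → nj ∈ d.getD (s + nj) []

lemma stepB_contains (v nj k : Int) (d : PySem.Dict Int (List Int)) :
    (canCrossStepB v d nj).contains k = d.contains k := by
  unfold canCrossStepB
  split
  · next hc =>
      rw [PySem.Dict.contains_modify]
      by_cases hk : k = v + nj
      · subst hk; simp [hc.2]
      · simp [hk]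
  · rfl

lemma stepB_getD (v nj w x : Int) (d : PySem.Dict Int (List Int)) :
    x ∈ (canCrossStepB v d nj).getD w [] ↔
      x ∈ d.getD w [] ∨ (x = nj ∧ 1 ≤ nj ∧ w = v + nj ∧ d.contains w = true) := by
  unfold canCrossStepB
  split
  · next hc =>
    rw [PySem.Dict.getD_modify]
    by_cases hw : w = v + nj
    · rw [if_pos hw]
      constructor
      · intro h
        by_cases hm : x ∈ d.getD (v + nj) []
        · exact Or.inl (hw ▸ hm)
        · right
          split at h
          · exact absurd h hm
          · rcases List.mem_append.mp h with h | h
            · exact absurd h hm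
            · simp only [List.mem_singleton] at h
              exact ⟨h, hc.1, hw, hw ▸ hc.2⟩
      · intro h
        have hx : x ∈ d.getD (v + nj) [] ∨ x = nj := by
          rcases h with h | ⟨h, _, _, _⟩
          · exact Or.inl (hw ▸ h)
          · exact Or.inr h
        rcases hx with h | rfl
        · split <;> simp [h]
        · split
          · next hm => exact hm
          · exact List.mem_append.mpr (Or.inr (by simp))
    · rw [if_neg hw]
      constructor
      · tauto
      · rintro (h | ⟨_, _, hww, _⟩)
        · exact h
        · exact absurd hww hw
  · next hc =>
    constructor
    · tauto
    · rintro (h | ⟨rfl, h1, rfl, h3⟩)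
      · exact h
      · exact absurd ⟨h1, h3⟩ hc

lemma addB_contains (v j k : Int) (d : PySem.Dict Int (List Int)) :
    (canCrossAddB v d j).contains k = d.contains k := by
  unfold canCrossAddB
  simp only [List.foldl_cons, List.foldl_nil, stepB_contains]

lemma addB_getD (v j w x : Int) (d : PySem.Dict Int (List Int)) :
    x ∈ (canCrossAddB v d j).getD w [] ↔
      x ∈ d.getD w [] ∨ (max 1 (j - 1) ≤ x ∧ x ≤ j + 1 ∧ w = v + x ∧ d.contains w = true) := by
  unfold canCrossAddB
  simp only [List.foldl_cons, List.foldl_nil]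
  rw [stepB_getD, stepB_getD, stepB_getD]
  simp only [stepB_contains]
  constructor
  · rintro (((h | ⟨rfl, h1, rfl, hc⟩) | ⟨rfl, h1, rfl, hc⟩) | ⟨rfl, h1, rfl, hc⟩)
    · exact Or.inl h
    · exact Or.inr ⟨by omega, by omega, rfl, hc⟩
    · exact Or.inr ⟨by omega, by omega, rfl, hc⟩
    · exact Or.inr ⟨by omega, by omega, rfl, hc⟩
  · rintro (h | ⟨h1, h2, rfl, hc⟩)
    · exact Or.inl (Or.inl (Or.inl h))
    · have hx : x = j - 1 ∨ x = j ∨ x = j + 1 := by omega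
      rcases hx with rfl | rfl | rfl
      · exact Or.inl (Or.inl (Or.inr ⟨rfl, by omega, rfl, hc⟩))
      · exact Or.inl (Or.inr ⟨rfl, by omega, rfl, hc⟩)
      · exact Or.inr ⟨rfl, by omega, rfl, hc⟩

lemma foldAddB_contains (v k : Int) :
    ∀ (js : List Int) (d : PySem.Dict Int (List Int)),
    (js.foldl (canCrossAddB v) d).contains k = d.contains k := by
  intro js
  induction js with
  | nil => intro d; rfl
  | cons j rest ih =>
      intro d
      simp only [List.foldl_cons, ih, addB_contains]

lemma foldAddB_getD (v w x : Int) :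
    ∀ (js : List Int) (d : PySem.Dict Int (List Int)),
    x ∈ (js.foldl (canCrossAddB v) d).getD w [] ↔
      x ∈ d.getD w [] ∨
        ∃ j ∈ js, max 1 (j - 1) ≤ x ∧ x ≤ j + 1 ∧ w = v + x ∧ d.contains w = true := by
  intro js
  induction js with
  | nil => intro d; simp
  | cons j rest ih =>
      intro d
      simp only [List.foldl_cons]
      rw [ih, addB_getD]
      simp only [addB_contains, List.exists_mem_cons_iff]
      tauto

lemma procB_inv (stones : List Int) (v : Int) (suf' : List Int)
    (hgt : ∀ y ∈ suf', v < y) (d : PySem.Dict Int (List Int))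
    (inv : InvB stones (v :: suf') d) : InvB stones suf' (canCrossProcB d v) := by
  unfold canCrossProcB
  set jumps := d.getD v [] ++ (if v = 1 then [1] else []) with hjumps
  have hjsound : ∀ j ∈ jumps, ReachP stones v j := by
    intro j hj
    rcases List.mem_append.mp hj with h | h
    · exact Or.inr (inv.sound v j h)
    · split at h
      · next hv => simp only [List.mem_singleton] at h; exact Or.inl ⟨hv, h⟩
      · exact absurd h (List.not_mem_nil)
  have hjcomplete : ∀ j : Int, ReachP stones v j → j ∈ jumps := by
    intro j hj
    rcases hj with ⟨hv, rfl⟩ | hj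
    · exact List.mem_append.mpr (Or.inr (by rw [if_pos hv]; simp))
    · refine List.mem_append.mpr (Or.inl ?_)
      obtain ⟨s0, j0, hre, hb1, hb2, hveq, hvmem, hlt, hs0⟩ := Arr_inv hj
      have hnot : s0 ∉ v :: suf' := by
        intro hmem
        rcases List.mem_cons.mp hmem with rfl | hmem
        · omega
        · exact absurd (hgt _ hmem) (by omega)
      have := inv.complete s0 j0 j hre hb1 hb2 (hveq ▸ hvmem) hnot
      rwa [← hveq] at this
  constructor
  · intro k
    rw [foldAddB_contains]
    exact inv.keys k
  · intro w x hx
    rcases (foldAddB_getD v w x jumps d).mp hx with h | ⟨j0, hj0, hb1, hb2, rfl, hc⟩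
    · exact inv.sound w x h
    · exact ReachP_succ (hjsound j0 hj0) hb1 hb2 ((inv.keys _).mp hc)
  · intro s j nj hre hb1 hb2 hmem hns
    by_cases hs : s = v
    · subst hs
      refine (foldAddB_getD s (s + nj) nj jumps d).mpr (Or.inr ?_)
      exact ⟨j, hjcomplete j hre, hb1, hb2, rfl, (inv.keys _).mpr hmem⟩
    · have : s ∉ v :: suf' := by
        intro h
        rcases List.mem_cons.mp h with rfl | h
        · exact hs rfl
        · exact hns h
      exact (foldAddB_getD v (s + nj) nj jumps d).mpr
        (Or.inl (inv.complete s j nj hre hb1 hb2 hmem this))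

lemma foldB_spec (stones : List Int) :
    ∀ (suf : List Int) (d : PySem.Dict Int (List Int)), suf.Pairwise (· < ·) →
    InvB stones suf d → InvB stones [] (suf.foldl canCrossProcB d) := by
  intro suf
  induction suf with
  | nil => intro d _ inv; exact inv
  | cons v suf' ih =>
      intro d hp inv
      rw [List.pairwise_cons] at hp
      exact ih _ hp.2 (procB_inv stones v suf' hp.1 d inv)

lemma getD_foldl_insert_nil (l : List Int) (d : PySem.Dict Int (List Int))
    (h : ∀ k : Int, d.getD k [] = []) :
    ∀ k : Int, (l.foldl (fun d s => d.insert s ([] : List Int)) d).getD k [] = [] := by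
  induction l generalizing d with
  | nil => exact h
  | cons a l ih =>
      intro k
      refine ih (d.insert a []) ?_ k
      intro k'
      rw [PySem.Dict.getD_insert]
      split
      · rfl
      · exact h k' 

lemma B_main (stones : List Int) (hone : (1 : Int) ∈ stones) :
    ((!((( (PySem.List.sorted
        (stones.foldl (fun d s => d.insert s ([] : List Int)) PySem.Dict.empty).keys
        (fun x => x) false).foldl canCrossProcB
        (stones.foldl (fun d s => d.insert s ([] : List Int)) PySem.Dict.empty)).getD
        (PySem.List.pyGetD stones (-1) 0) []).isEmpty)) = true) ↔
      ∃ j, Arr stones (PySem.List.pyGetD stones (-1) 0) j := by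
  set target := PySem.List.pyGetD stones (-1) 0 with htarget
  set a := stones.foldl (fun d s => d.insert s ([] : List Int)) PySem.Dict.empty with ha
  have hkeys : a.keys = PySem.Set.ofList stones := by
    rw [ha, PySem.Dict.keys_foldl_insert]
    rw [PySem.Dict.keys_empty, PySem.Set.update_nil_left]
  have hcont : ∀ k : Int, a.contains k = true ↔ k ∈ stones := by
    intro k
    rw [PySem.Dict.contains_iff_mem_keys, hkeys, PySem.Set.mem_ofList]
  set vs := PySem.List.sorted a.keys (fun x => x) false with hvs
  have hvsmem : ∀ v : Int, v ∈ vs ↔ v ∈ stones := by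
    intro v
    rw [hvs, PySem.List.mem_sorted, hkeys, PySem.Set.mem_ofList]
  have hvspair : vs.Pairwise (· < ·) := by
    rw [hvs, hkeys]
    exact PySem.List.sorted_ofList_pairwise_lt stones
  have hempty : ∀ k : Int, a.getD k [] = [] := by
    rw [ha]
    exact getD_foldl_insert_nil stones PySem.Dict.empty (fun k => rfl)
  have inv0 : InvB stones vs a := by
    constructor
    · exact hcont
    · intro v j hj
      rw [hempty v] at hj
      exact absurd hj (List.not_mem_nil)
    · intro s j nj hre _ _ _ hns
      exfalso
      apply hns
      rw [hvsmem]
      rcases hre with ⟨rfl, _⟩ | h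
      · exact hone
      · exact Arr_mem h
  have invF : InvB stones [] (vs.foldl canCrossProcB a) := foldB_spec stones vs a hvspair inv0
  constructor
  · intro h
    rw [Bool.not_eq_eq_eq_not, Bool.not_true, List.isEmpty_eq_false_iff_exists_mem] at h
    obtain ⟨x, hx⟩ := h
    exact ⟨x, invF.sound target x hx⟩
  · rintro ⟨j, hj⟩
    rw [Bool.not_eq_eq_eq_not, Bool.not_true, List.isEmpty_eq_false_iff_exists_mem]
    obtain ⟨s0, j0, hre, hb1, hb2, hveq, hvmem, _, _⟩ := Arr_inv hj
    refine ⟨j, ?_⟩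
    have := invF.complete s0 j0 j hre hb1 hb2 (hveq ▸ hvmem) (List.not_mem_nil)
    rwa [← hveq] at this

-- ===== VERDICT (by name: the statement is the Claim_ definition above) =====
theorem canCross_bfs_spec : Claim_equal_canCross_bfs := by
  intro stones _ hpre
  unfold Pre_canCross_bfs at hpre
  unfold Spec_canCross_bfs canCross_bfs canCross_bfs_alt
  have h1lt : 1 < stones.length := by omega
  have hget : PySem.List.pyGet? stones 1 = some (stones[1]'h1lt) := by
    rw [show (1 : Int) = ((1 : Nat) : Int) from rfl, PySem.List.pyGet?_natCast]
    exact List.getElem?_eq_getElem h1lt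
  rw [hget]
  by_cases hs1 : stones[1] = 1
  · by_cases hlen : stones.length = 2
    · simp [hs1, hlen]
    · simp only [hs1, ne_eq, not_true_eq_false, if_false, if_neg hlen]
      have hone : (1 : Int) ∈ stones := hs1 ▸ List.getElem_mem h1lt
      have hlast : PySem.List.pyGetD stones (-1) 0 ∈ stones := by
        apply PySem.List.pyGetD_mem
        simp [PySem.Raise.InRange]
        omega
      rw [Bool.eq_iff_iff]
      exact (A_main stones hone hlast).trans (B_main stones hone).symm
  · simp [hs1]
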